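-- pv_equiv track=rewrite | github.com/vanahu84/ai_agent_demand_forecasting | autonomous_demand_forecasting/model_validation_mcp_server.py | _summarize_trends
-- ===== SOURCE A (Python) =====
-- from typing import Dict, List, Optional, Any, Tuple
--
-- def _summarize_trends(trends: Dict[str, Any]) -> str:
--     """Summarize trend analysis results."""
--     trend_directions = [trend.get("direction", "unknown") for trend in trends.values()]
--
--     if all(d == "improving" for d in trend_directions):
--         return "All metrics show improving trends"
--     elif all(d == "declining" for d in trend_directions):
--         return "All metrics show declining trends"
--     elif "declining" in trend_directions:
--         return "Mixed trends with some declining metrics"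
--     elif "improving" in trend_directions:
--         return "Mixed trends with some improving metrics"
--     else:
--         return "Stable trends across metrics"
-- ===== SOURCE B (Python) =====
-- def _summarize_trends(trends):
--     """Summarize trend analysis results."""
--     total = 0
--     improving_count = 0
--     declining_count = 0
--     for trend in trends.values():
--         d = trend.get("direction", "unknown")
--         total += 1
--         if d == "improving":
--             improving_count += 1
--         elif d == "declining":
--             declining_count += 1
--     if improving_count == total:
--         return "All metrics show improving trends"
--     elif declining_count == total:
--         return "All metrics show declining trends"
--     elif declining_count > 0:
--         return "Mixed trends with some declining metrics"
--     elif improving_count > 0: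
--         return "Mixed trends with some improving metrics"
--     else:
--         return "Stable trends across metrics"
-- ===== Notes on version B (the rewrite author's own statement) =====
-- stated objective: simpler
-- what changed: Replaces A's materialized direction list plus four separate all()/in scans with a single counting pass (total/improving/declining tallies) and a branch on the counts alone.
import Mathlib
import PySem

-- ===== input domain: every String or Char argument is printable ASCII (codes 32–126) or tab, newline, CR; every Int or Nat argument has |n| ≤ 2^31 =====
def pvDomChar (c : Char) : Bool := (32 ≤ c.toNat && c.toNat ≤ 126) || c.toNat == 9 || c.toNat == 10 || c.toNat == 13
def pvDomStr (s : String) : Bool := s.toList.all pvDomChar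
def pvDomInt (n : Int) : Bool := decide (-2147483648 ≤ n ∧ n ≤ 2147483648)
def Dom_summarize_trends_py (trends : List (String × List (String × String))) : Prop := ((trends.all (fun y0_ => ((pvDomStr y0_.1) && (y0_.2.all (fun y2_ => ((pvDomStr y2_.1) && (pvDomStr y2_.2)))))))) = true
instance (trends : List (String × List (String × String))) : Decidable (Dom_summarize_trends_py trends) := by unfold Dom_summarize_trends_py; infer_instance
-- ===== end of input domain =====

-- B replaces A's materialized direction list and four separate all()/in scans by one
-- counting pass plus a branch on the tallies (objective: simpler, same O(n) cost).

-- ===== PORT A =====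
-- trend.get("direction", "unknown") on one dict value
def pvDirOf (trend : List (String × String)) : String :=
  PySem.Dict.getD (PySem.Dict.mk trend) "direction" "unknown"

def summarize_trends_py (trends : List (String × List (String × String))) : String :=
  let trend_directions := trends.map (fun kv => pvDirOf kv.2)
  if trend_directions.all (fun d => d == "improving") then
    "All metrics show improving trends"
  else if trend_directions.all (fun d => d == "declining") then
    "All metrics show declining trends"
  else if trend_directions.contains "declining" then
    "Mixed trends with some declining metrics"
  else if trend_directions.contains "improving" then
    "Mixed trends with some improving metrics"
  else
    "Stable trends across metrics"

-- ===== PORT B =====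
def summarize_trends_py_alt (trends : List (String × List (String × String))) : String :=
  let acc := trends.foldl (fun (acc : Int × Int × Int) kv =>
      let d := pvDirOf kv.2
      (acc.1 + 1,
       acc.2.1 + (if d == "improving" then 1 else 0),
       acc.2.2 + (if d == "declining" then 1 else 0))) (0, 0, 0)
  if acc.2.1 == acc.1 then
    "All metrics show improving trends"
  else if acc.2.2 == acc.1 then
    "All metrics show declining trends"
  else if acc.2.2 > 0 then
    "Mixed trends with some declining metrics"
  else if acc.2.1 > 0 then
    "Mixed trends with some improving metrics"
  else
    "Stable trends across metrics"

-- ===== PRECONDITION & SPEC =====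
def Spec_summarize_trends_py (trends : List (String × List (String × String))) (out : String) : Prop := out = summarize_trends_py_alt trends
instance (trends : List (String × List (String × String))) (out : String) : Decidable (Spec_summarize_trends_py trends out) := by unfold Spec_summarize_trends_py; infer_instance

-- ===== CLAIM (what is proved, stated in full; the proofs are below) =====
def Claim_equal_summarize_trends_py : Prop := ∀ (trends : List (String × List (String × String))), Dom_summarize_trends_py trends → Spec_summarize_trends_py trends (summarize_trends_py trends)

-- ===== LEMMAS AND PROOFS =====

-- B's fold computes (length, count "improving", count "declining") of A's direction list.
theorem pv_fold_counts (trends : List (String × List (String × String))) (a b c : Int) :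
    trends.foldl (fun (acc : Int × Int × Int) kv =>
      let d := pvDirOf kv.2
      (acc.1 + 1,
       acc.2.1 + (if d == "improving" then 1 else 0),
       acc.2.2 + (if d == "declining" then 1 else 0))) (a, b, c)
    = (a + (trends.map (fun kv => pvDirOf kv.2)).length,
       b + (trends.map (fun kv => pvDirOf kv.2)).count "improving",
       c + (trends.map (fun kv => pvDirOf kv.2)).count "declining") := by
  induction trends generalizing a b c with
  | nil => simp
  | cons hd tl ih =>
    simp only [List.foldl_cons, List.map_cons, List.length_cons, List.count_cons, ih,
      Prod.mk.injEq]
    refine ⟨by push_cast; ring, ?_, ?_⟩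
    · by_cases h : pvDirOf hd.2 == "improving" <;> simp [h] <;> ring
    · by_cases h : pvDirOf hd.2 == "declining" <;> simp [h] <;> ring

theorem pv_key (dirs : List String) :
    (if dirs.all (fun d => d == "improving") then
      "All metrics show improving trends"
    else if dirs.all (fun d => d == "declining") then
      "All metrics show declining trends"
    else if dirs.contains "declining" then
      "Mixed trends with some declining metrics"
    else if dirs.contains "improving" then
      "Mixed trends with some improving metrics"
    else
      "Stable trends across metrics")
    = (if ((dirs.count "improving" : Int) == (dirs.length : Int)) then
      "All metrics show improving trends"
    else if ((dirs.count "declining" : Int) == (dirs.length : Int)) then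
      "All metrics show declining trends"
    else if ((dirs.count "declining" : Int) > 0) then
      "Mixed trends with some declining metrics"
    else if ((dirs.count "improving" : Int) > 0) then
      "Mixed trends with some improving metrics"
    else
      "Stable trends across metrics") := by
  have hall : ∀ s : String, (dirs.all (fun d => d == s) = true) ↔ dirs.count s = dirs.length := by
    intro s
    rw [List.all_eq_true]
    rw [List.count_eq_length]
    constructor
    · intro h x hx; exact ((beq_iff_eq).1 (h x hx)).symm
    · intro h x hx; exact beq_iff_eq.2 (h x hx).symm
  have hmem : ∀ s : String, (dirs.contains s = true) ↔ 0 < dirs.count s := by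
    intro s; rw [List.contains_iff_mem, List.count_pos_iff]
  by_cases h1 : dirs.all (fun d => d == "improving")
  · have := (hall _).1 h1
    simp [h1, this]
  · have h1' : ¬ ((dirs.count "improving" : Int) = (dirs.length : Int)) := by
      intro h; exact h1 ((hall _).2 (by exact_mod_cast h))
    by_cases h2 : dirs.all (fun d => d == "declining")
    · have := (hall _).1 h2
      simp [h1, h2, h1', this]
    · have h2' : ¬ ((dirs.count "declining" : Int) = (dirs.length : Int)) := by
        intro h; exact h2 ((hall _).2 (by exact_mod_cast h))
      by_cases h3 : dirs.contains "declining"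
      · have := (hmem _).1 h3
        simp [h1, h2, h1', h2']
      · have h3' : ¬ ((0:Int) < (dirs.count "declining" : Int)) := by
          intro h
          exact h3 ((hmem _).2 (by exact_mod_cast h))
        by_cases h4 : dirs.contains "improving"
        · have := (hmem _).1 h4
          simp [h1, h2, h1', h2']
        · have h4' : ¬ ((0:Int) < (dirs.count "improving" : Int)) := by
            intro h
            exact h4 ((hmem _).2 (by exact_mod_cast h))
          simp [h1, h2, h1', h2']

-- ===== VERDICT (by name: the statement is the Claim_ definition above) =====
theorem summarize_trends_py_spec : Claim_equal_summarize_trends_py := by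
  intro trends _
  unfold Spec_summarize_trends_py summarize_trends_py summarize_trends_py_alt
  rw [pv_fold_counts]
  simp only [zero_add]
  exact pv_key (trends.map (fun kv => pvDirOf kv.2))
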